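-- pv_equiv track=rewrite | github.com/emirozturk/MLMStego | MLMStego.py | intToPackets
-- ===== SOURCE A (Python) =====
-- def intToPackets(intValue,packetSize):
--     value = bin(intValue)[2:]
--     value = value.zfill(32)
--     pad = (packetSize - len(value)%packetSize)%packetSize
--     value = value.zfill(len(value)+pad)
--     packets=[]
--     for i in range(0,len(value),packetSize):
--         x = value[i:i+packetSize]
--         i = int(x,2)
--         packets.append(i)
--     return packets
-- ===== SOURCE B (Python) =====
-- def intToPackets(intValue, packetSize):
--     base = max(intValue.bit_length(), 32)
--     total = base + (-base) % packetSize
--     return [(intValue >> (total - i - packetSize)) & ((1 << packetSize) - 1)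
--             for i in range(0, total, packetSize)]
-- ===== Notes on version B (the rewrite author's own statement) =====
-- stated objective: simpler
-- what changed: B computes each packet directly by shifting and masking the integer over a bit width rounded up to a multiple of packetSize, instead of A's building a zero-filled binary character string and parsing fixed-size slices of it back with int(x,2).
-- outside the precondition, e.g. on intToPackets(5, 0): A raises ZeroDivisionError, B raises ZeroDivisionError; on intToPackets(-5, 3): A raises ValueError, B returns [7, 7, 7, 7, 7, 7, 7, 7, 7, 7, 3]; on intToPackets(-1, 3): A returns [0, 0, 0, 0, 0, 0, 0, 0, 0, 0, 1], B returns [7, 7, 7, 7, 7, 7, 7, 7, 7, 7, 7]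
import Mathlib
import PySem

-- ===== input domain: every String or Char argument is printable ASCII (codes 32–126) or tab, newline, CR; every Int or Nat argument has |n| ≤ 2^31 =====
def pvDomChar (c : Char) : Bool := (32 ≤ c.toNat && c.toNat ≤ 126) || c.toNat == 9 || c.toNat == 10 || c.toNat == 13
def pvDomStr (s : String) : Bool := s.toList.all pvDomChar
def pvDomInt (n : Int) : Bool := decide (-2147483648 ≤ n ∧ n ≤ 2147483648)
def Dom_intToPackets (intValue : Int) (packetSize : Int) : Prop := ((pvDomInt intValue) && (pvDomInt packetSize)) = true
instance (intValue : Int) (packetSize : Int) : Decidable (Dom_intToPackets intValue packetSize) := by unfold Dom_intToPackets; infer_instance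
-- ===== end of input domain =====

-- B replaces A's zero-filled binary string and its slicing by direct shift/mask
-- arithmetic on the integer (simpler: no character buffer is built).

-- ===== PORT A =====
-- int(x, 2) ported by hand as a digit fold; exact for nonempty strings of '0'/'1'
-- characters, which is the only shape of string it receives here under Pre_
-- (every slice of the zero-filled binary string of a nonnegative int).
def pvParseBin (cs : List Char) : Int :=
  cs.foldl (fun acc c => 2 * acc + (if c = '1' then 1 else 0)) 0

def intToPackets (intValue : Int) (packetSize : Int) : List Int :=
  let value0 := PySem.List.slice (PySem.Int.toBinChars0b intValue) (some 2) none
  let value1 := PySem.Chars.zfill value0 32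
  let pad := PySem.Int.mod (packetSize - PySem.Int.mod (value1.length : Int) packetSize) packetSize
  let value := PySem.Chars.zfill value1 ((value1.length : Int) + pad)
  (PySem.List.pyRange 0 (value.length : Int) packetSize).foldl
    (fun packets i =>
      packets ++ [pvParseBin (PySem.List.slice value (some i) (some (i + packetSize)))]) []

-- ===== PORT B =====
-- shifts: for every i the range produces (packetSize ≥ 1 then), total - i - packetSize ≥ 0,
-- so .toNat is exact there; for packetSize < 0 the range is empty and the body never runs.
def intToPackets_alt (intValue : Int) (packetSize : Int) : List Int :=
  let base : Int := max ((PySem.Int.bitLength intValue : Nat) : Int) 32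
  let total := base + PySem.Int.mod (-base) packetSize
  (PySem.List.pyRange 0 total packetSize).map
    (fun i => PySem.Int.band (intValue >>> (total - i - packetSize).toNat)
        ((1 <<< packetSize.toNat) - 1))

-- ===== PRECONDITION & SPEC =====
-- Pre_ excludes packetSize = 0, where A raises ZeroDivisionError, and negative
-- intValue with positive packetSize, where bin gives '-0b…' so A either raises
-- ValueError on a slice containing the stray 'b' or accidentally parses a '0b…'
-- slice as a prefixed literal — an artefact of A's string round-trip that no
-- caller would specify (B returns the two's-complement-style packets there).
def Pre_intToPackets (intValue : Int) (packetSize : Int) : Prop :=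
  packetSize ≠ 0 ∧ (0 ≤ intValue ∨ packetSize < 0)
instance (intValue : Int) (packetSize : Int) : Decidable (Pre_intToPackets intValue packetSize) := by unfold Pre_intToPackets; infer_instance

def pvWitness_intToPackets : Int × Int := (11, 3)

def Spec_intToPackets (intValue : Int) (packetSize : Int) (out : List Int) : Prop := out = intToPackets_alt intValue packetSize
instance (intValue : Int) (packetSize : Int) (out : List Int) : Decidable (Spec_intToPackets intValue packetSize out) := by unfold Spec_intToPackets; infer_instance

-- ===== CLAIM (what is proved, stated in full; the proofs are below) =====
def Claim_equal_intToPackets : Prop := ∀ (intValue : Int) (packetSize : Int), Dom_intToPackets intValue packetSize → Pre_intToPackets intValue packetSize → Spec_intToPackets intValue packetSize (intToPackets intValue packetSize)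

-- ===== LEMMAS AND PROOFS =====

-- fixed-width big-endian binary digits of a natural number
def pvBitsW : Nat → Nat → List Char
  | 0, _ => []
  | w + 1, m => pvBitsW w (m / 2) ++ [if m % 2 = 1 then '1' else '0']

theorem pvBitsW_length (w m : Nat) : (pvBitsW w m).length = w := by
  induction w generalizing m with
  | zero => rfl
  | succ w ih => simp [pvBitsW, ih]

theorem pvBitsW_zero_val (w : Nat) : pvBitsW w 0 = List.replicate w '0' := by
  induction w with
  | zero => rfl
  | succ w ih => simp [pvBitsW, ih, List.replicate_succ']

theorem pvBitsW_split (a b m : Nat) :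
    pvBitsW (a + b) m = pvBitsW a (m / 2 ^ b) ++ pvBitsW b m := by
  induction b generalizing m with
  | zero => simp [pvBitsW]
  | succ b ih =>
    have h2 : m / 2 / 2 ^ b = m / 2 ^ (b + 1) := by
      rw [Nat.div_div_eq_div_mul, pow_succ, mul_comm 2 (2 ^ b), mul_comm (2 ^ b) 2]
    calc pvBitsW (a + (b + 1)) m = pvBitsW (a + b) (m / 2) ++ [if m % 2 = 1 then '1' else '0'] := by
          simp [pvBitsW]
      _ = pvBitsW a (m / 2 ^ (b + 1)) ++ pvBitsW (b + 1) m := by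
          rw [ih (m / 2), h2, pvBitsW]; simp

theorem pvParseBin_bitsW (w m : Nat) : pvParseBin (pvBitsW w m) = ((m % 2 ^ w : Nat) : Int) := by
  induction w generalizing m with
  | zero => simp [pvParseBin, pvBitsW]
  | succ w ih =>
    have hb : pvParseBin (pvBitsW (w + 1) m)
        = 2 * pvParseBin (pvBitsW w (m / 2)) + (if m % 2 = 1 then 1 else 0) := by
      simp [pvParseBin, pvBitsW, List.foldl_append]
    have key : m % 2 ^ (w + 1) = 2 * (m / 2 % 2 ^ w) + m % 2 := by
      have hmm : m % (2 * 2 ^ w) = m % 2 + 2 * (m / 2 % 2 ^ w) := Nat.mod_mul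
      rw [pow_succ, mul_comm]
      omega
    rw [hb, ih, key]
    rcases (by omega : m % 2 = 1 ∨ m % 2 = 0) with h2 | h2 <;> rw [h2] <;> push_cast <;> ring

theorem pvToDigits_chars (m : Nat) : ∀ c ∈ Nat.toDigits 2 m, c = '0' ∨ c = '1' := by
  induction m using Nat.strong_induction_on with
  | _ m ih =>
    rw [Nat.toDigits_eq_if (by norm_num)]
    split
    · intro c hc
      interval_cases m <;> simp_all <;> simp [Nat.digitChar, *]
    · intro c hc
      rcases List.mem_append.mp hc with h | h
      · exact ih (m / 2) (by omega) c h
      · have h2 : m % 2 = 0 ∨ m % 2 = 1 := by omega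
        rcases h2 with h2 | h2 <;> simp_all [Nat.digitChar]

theorem pvToDigits_len (m : Nat) (h : 0 < m) :
    (Nat.toDigits 2 m).length = PySem.Int.bitLength (m : Int) := by
  induction m using Nat.strong_induction_on with
  | _ m ih =>
    rw [Nat.toDigits_eq_if (by norm_num), PySem.Int.bitLength_natCast h]
    split
    · have hm : m = 1 := by omega
      subst hm; decide
    · rename_i hge
      have h2 : 0 < m / 2 := by omega
      rw [List.length_append, ih (m / 2) (by omega) h2]
      simp

theorem pvBitsW_eq_pad (w m : Nat) (hw : 0 < w) (hm : m < 2 ^ w) :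
    pvBitsW w m = List.replicate (w - (Nat.toDigits 2 m).length) '0' ++ Nat.toDigits 2 m := by
  induction w generalizing m with
  | zero => omega
  | succ w ih =>
    by_cases hsmall : m < 2
    · have : pvBitsW (w + 1) m = List.replicate w '0' ++ [if m % 2 = 1 then '1' else '0'] := by
        rw [pvBitsW, Nat.div_eq_of_lt hsmall, pvBitsW_zero_val]
      rw [this]
      interval_cases m <;> simp [Nat.toDigits_of_lt_base, Nat.digitChar]
    · have hw' : 0 < w := by
        by_contra h
        have : w = 0 := by omega
        subst this; omega
      have hdig : Nat.toDigits 2 m = Nat.toDigits 2 (m / 2) ++ [(m % 2).digitChar] := by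
        rw [Nat.toDigits_eq_if (by norm_num)]; simp [hsmall]
      have hchar : (m % 2).digitChar = (if m % 2 = 1 then '1' else '0') := by
        have h2 : m % 2 = 0 ∨ m % 2 = 1 := by omega
        rcases h2 with h2 | h2 <;> simp [h2, Nat.digitChar]
      have hlen : (Nat.toDigits 2 m).length = (Nat.toDigits 2 (m / 2)).length + 1 := by
        rw [hdig]; simp
      have hlt : m / 2 < 2 ^ w := by
        have : 2 ^ (w + 1) = 2 ^ w * 2 := by ring
        omega
      have hle : (Nat.toDigits 2 (m / 2)).length ≤ w := by
        have h1 := congrArg List.length (ih (m / 2) hw' hlt)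
        simp [pvBitsW_length] at h1
        omega
      have harg : w + 1 - (Nat.toDigits 2 (m / 2) ++ [(if m % 2 = 1 then '1' else '0')]).length
          = w - (Nat.toDigits 2 (m / 2)).length := by
        simp
      rw [pvBitsW, ih (m / 2) hw' hlt, hdig, hchar, harg, List.append_assoc]

theorem pvZfill_eq (cs : List Char) (w : Int) (hc : ∀ c ∈ cs, c = '0' ∨ c = '1') :
    PySem.Chars.zfill cs w = List.replicate (w.toNat - cs.length) '0' ++ cs := by
  rw [PySem.Chars.zfill.eq_def]
  split
  · rename_i hle
    have : w.toNat - cs.length = 0 := by omega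
    simp [this]
  · rename_i hgt
    match cs, hc with
    | [], _ => simp
    | c :: rest, hc =>
      have := hc c (by simp)
      have hne : ¬ (c = '+' ∨ c = '-') := by rcases this with h | h <;> subst h <;> decide
      simp [hne]

-- pyRange 0 t s with a negative step and nonnegative stop is empty
theorem pvPyRange_neg_nil (t s : Int) (hs : s < 0) (ht : 0 ≤ t) :
    PySem.List.pyRange 0 t s = [] := by
  rw [PySem.List.pyRange]
  simp [show ¬ s = 0 by omega, show ¬ 0 < s by omega, show ¬ t < 0 by omega]

-- Python's (p - L % p) % p = (-L) % p for 0 < p (both are emod there)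
theorem pvPad_eq (L p : Int) (hp : 0 < p) :
    PySem.Int.mod (p - PySem.Int.mod L p) p = PySem.Int.mod (-L) p := by
  rw [PySem.Int.mod_eq_emod_of_pos hp, PySem.Int.mod_eq_emod_of_pos hp,
      PySem.Int.mod_eq_emod_of_pos hp]
  have h1 : p - L % p = -(L % p) + p * 1 := by ring
  have h2 : -L = -(L % p) + p * (-(L / p)) := by
    linear_combination Int.mul_ediv_add_emod L p
  rw [h1, Int.add_mul_emod_self_left, h2, Int.add_mul_emod_self_left]

-- A's fully padded string is the fixed-width binary representation
theorem pvValue_eq_bitsW (n T l0 : Nat) (hl0 : l0 = (Nat.toDigits 2 n).length)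
    (hle : max l0 32 ≤ T) (hn : n < 2 ^ T) :
    List.replicate (T - max l0 32) '0' ++ (List.replicate (32 - l0) '0' ++ Nat.toDigits 2 n)
      = pvBitsW T n := by
  have hT : 0 < T := by omega
  rw [pvBitsW_eq_pad T n hT hn, ← hl0, ← List.append_assoc, ← List.replicate_add]
  congr 2
  omega

theorem pvMask_eq (p : Nat) :
    ((1 <<< p : Int) - 1) = ((2 ^ p - 1 : Nat) : Int) := by
  have h1 : (1 <<< p : Int) = ((1 <<< p : Nat) : Int) := (Int.natCast_shiftLeft 1 p).symm
  rw [h1, Nat.shiftLeft_eq, one_mul]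
  have : (1 : Nat) ≤ 2 ^ p := Nat.one_le_two_pow
  push_cast [this]
  ring

-- ===== VERDICT (by name: the statement is the Claim_ definition above) =====
theorem intToPackets_spec : Claim_equal_intToPackets := by
  intro intValue packetSize _hdom hpre
  obtain ⟨hps, hor⟩ := hpre
  unfold Spec_intToPackets
  simp only [intToPackets, intToPackets_alt]
  rcases lt_or_gt_of_ne hps with hneg | hp
  · -- negative packetSize: both loops run over an empty range
    rw [pvPyRange_neg_nil _ _ hneg (by positivity)]
    have hbase : (0 : Int) < max ((PySem.Int.bitLength intValue : Nat) : Int) 32 :=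
      lt_of_lt_of_le (by norm_num) (le_max_right _ _)
    have hm := PySem.Int.mod_neg_bounds
      (-(max ((PySem.Int.bitLength intValue : Nat) : Int) 32)) hneg
    have hf := PySem.Int.floordiv_mul_add_mod
      (-(max ((PySem.Int.bitLength intValue : Nat) : Int) 32)) packetSize
    set B := max ((PySem.Int.bitLength intValue : Nat) : Int) 32 with hB
    set f := PySem.Int.floordiv (-B) packetSize with hfdef
    set m := PySem.Int.mod (-B) packetSize with hmdef
    have htk : B + m = -f * packetSize := by linarith
    have htpos : packetSize < B + m := by omega
    have htot : 0 ≤ B + m := by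
      rcases (by omega : -f ≤ 0 ∨ 0 < -f) with hk | hk
      · have h1 : 0 ≤ (-(-f)) * (-packetSize) := mul_nonneg (by omega) (by omega)
        rw [neg_mul_neg] at h1
        omega
      · have h1 : (-f) * packetSize ≤ 1 * packetSize :=
          mul_le_mul_of_nonpos_right (by omega) (le_of_lt hneg)
        rw [one_mul] at h1
        omega
    rw [pvPyRange_neg_nil _ _ hneg htot]
    simp
  · -- positive packetSize
    have hnn : 0 ≤ intValue := by omega
    obtain ⟨n, rfl⟩ : ∃ n : Nat, intValue = (n : Int) := ⟨intValue.toNat, by omega⟩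
    have h0b : PySem.Int.toBinChars0b (n : Int) = '0' :: 'b' :: Nat.toDigits 2 n := by
      simp [PySem.Int.toBinChars0b]
    have hval0 : PySem.List.slice (PySem.Int.toBinChars0b (n : Int)) (some 2) none
        = Nat.toDigits 2 n := by
      rw [h0b, PySem.List.slice_from _ (by norm_num)]
      rfl
    rw [hval0]
    have hbin0 : ∀ c ∈ Nat.toDigits 2 n, c = '0' ∨ c = '1' := pvToDigits_chars n
    have hz1 : PySem.Chars.zfill (Nat.toDigits 2 n) 32
        = List.replicate (32 - (Nat.toDigits 2 n).length) '0' ++ Nat.toDigits 2 n := by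
      simpa using pvZfill_eq (Nat.toDigits 2 n) 32 hbin0
    rw [hz1]
    obtain ⟨pN, rfl, hpN⟩ : ∃ pN : Nat, packetSize = (pN : Int) ∧ 0 < pN :=
      ⟨packetSize.toNat, by omega, by omega⟩
    clear hps hnn hor
    set l0 := (Nat.toDigits 2 n).length with hl0
    have hl0pos : 0 < l0 := Nat.length_toDigits_pos
    have hlen1 : (List.replicate (32 - l0) '0' ++ Nat.toDigits 2 n).length = max l0 32 := by
      simp [← hl0]
      omega
    rw [hlen1]
    set L1 := max l0 32 with hL1
    -- pad is the same nonnegative quantity on both sides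
    have hpadeq : PySem.Int.mod ((pN : Int) - PySem.Int.mod (L1 : Int) (pN : Int)) (pN : Int)
        = PySem.Int.mod (-(L1 : Int)) (pN : Int) := pvPad_eq (L1 : Int) (pN : Int) (by exact_mod_cast hp)
    rw [hpadeq]
    have hpz : (0 : Int) < (pN : Int) := by exact_mod_cast hp
    have hpadnn : 0 ≤ PySem.Int.mod (-(L1 : Int)) (pN : Int) := PySem.Int.mod_nonneg _ hpz
    set padZ := PySem.Int.mod (-(L1 : Int)) (pN : Int) with hpadZ
    obtain ⟨padN, hpad⟩ : ∃ padN : Nat, padZ = (padN : Nat) := ⟨padZ.toNat, by omega⟩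
    rw [hpad]
    set T := L1 + padN with hT
    -- base on the B side equals L1
    have hbase : max ((PySem.Int.bitLength (n : Int) : Nat) : Int) 32 = ((L1 : Nat) : Int) := by
      rcases Nat.eq_zero_or_pos n with hn0 | hn0
      · subst hn0
        have hone : l0 = 1 := by rw [hl0, Nat.toDigits_zero]; rfl
        rw [hL1, hone]
        simp [PySem.Int.bitLength_zero]
      · have : l0 = PySem.Int.bitLength (n : Int) := pvToDigits_len n hn0
        rw [hL1, ← this]
        push_cast [Nat.cast_max]
        rfl
    rw [hbase, ← hpadZ, hpad]
    -- second zfill: the fully padded string, and it is pvBitsW T n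
    have hbin1 : ∀ c ∈ List.replicate (32 - l0) '0' ++ Nat.toDigits 2 n, c = '0' ∨ c = '1' := by
      intro c hc
      rcases List.mem_append.mp hc with h | h
      · exact Or.inl (List.eq_of_mem_replicate h)
      · exact hbin0 c h
    have hz2 : PySem.Chars.zfill (List.replicate (32 - l0) '0' ++ Nat.toDigits 2 n)
          ((L1 : Int) + (padN : Int))
        = List.replicate (((L1 : Int) + (padN : Int)).toNat
            - (List.replicate (32 - l0) '0' ++ Nat.toDigits 2 n).length) '0'
          ++ (List.replicate (32 - l0) '0' ++ Nat.toDigits 2 n) :=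
      pvZfill_eq _ _ hbin1
    rw [hz2, hlen1]
    have htn : ((L1 : Int) + (padN : Int)).toNat = T := by omega
    rw [htn]
    have hnT : n < 2 ^ T := by
      have hnl0 : n < 2 ^ l0 := by
        rcases Nat.eq_zero_or_pos n with hn0 | hn0
        · subst hn0; positivity
        · have h1 : l0 = PySem.Int.bitLength (n : Int) := pvToDigits_len n hn0
          have h2 := PySem.Int.lt_two_pow_bitLength (n : Int)
          rw [Int.natAbs_natCast] at h2
          rw [h1]
          exact h2
      exact lt_of_lt_of_le hnl0 (Nat.pow_le_pow_right (by norm_num) (by omega))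
    have hVal : List.replicate (T - L1) '0'
          ++ (List.replicate (32 - l0) '0' ++ Nat.toDigits 2 n) = pvBitsW T n := by
      rw [hL1]
      exact pvValue_eq_bitsW n T l0 hl0.symm (by omega) hnT
    rw [hVal]
    have hlenV : (pvBitsW T n).length = T := pvBitsW_length T n
    rw [hlenV]
    -- both totals are T; the loops become maps over the same range
    have hTZ : ((L1 : Int) + (padN : Int)) = (T : Int) := by omega
    rw [hTZ]
    rw [PySem.List.foldl_append_singleton_eq_map
      (fun i => pvParseBin (PySem.List.slice (pvBitsW T n) (some i) (some (i + (pN : Int)))))]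
    rw [List.nil_append]
    -- T is a multiple of pN
    have hdvdT : ((pN : Int)) ∣ (T : Int) := by
      apply Int.dvd_of_emod_eq_zero
      have h1 : ((T : Int)) % (pN : Int) = ((L1 : Int) + (padN : Int)) % (pN : Int) := by
        rw [hT]
        push_cast
        ring_nf
      rw [h1, ← hpad, hpadZ, PySem.Int.mod_eq_emod_of_pos hpz, Int.add_emod,
          Int.emod_emod_of_dvd _ dvd_rfl, ← Int.add_emod]
      simp
    apply List.map_congr_left
    intro i hi
    rw [PySem.List.mem_pyRange_iff_of_pos hpz] at hi
    obtain ⟨hi0, hiT, hdvdi⟩ := hi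
    rw [sub_zero] at hdvdi
    obtain ⟨iN, rfl⟩ : ∃ iN : Nat, i = (iN : Int) := ⟨i.toNat, by omega⟩
    have hiTn : iN < T := by exact_mod_cast hiT
    have hle : iN + pN ≤ T := by
      have hd : ((pN : Int)) ∣ ((T : Int) - (iN : Int)) := dvd_sub hdvdT hdvdi
      have := Int.le_of_dvd (by omega) hd
      omega
    set rN := T - iN - pN with hrN
    have hTsplit : T = iN + (pN + rN) := by omega
    -- A's element
    have hslice : PySem.List.slice (pvBitsW T n) (some (iN : Int)) (some ((iN : Int) + (pN : Int)))
        = pvBitsW pN (n / 2 ^ rN) := by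
      rw [PySem.List.slice_natCast_add]
      rw [hTsplit, pvBitsW_split iN (pN + rN) n]
      rw [List.drop_left' (pvBitsW_length _ _)]
      rw [pvBitsW_split pN rN n]
      rw [List.take_left' (pvBitsW_length _ _)]
    rw [hslice, pvParseBin_bitsW]
    -- B's element
    have h1 : ((T : Int) - (iN : Int) - (pN : Int)).toNat = rN := by omega
    have h2 : ((pN : Int)).toNat = pN := Int.toNat_natCast _
    rw [h1, h2, pvMask_eq pN, ← Int.natCast_shiftRight, PySem.Int.band_natCast]
    rw [Nat.and_two_pow_sub_one_eq_mod, Nat.shiftRight_eq_div_pow]
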